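-- pv_equiv track=rewrite | github.com/tratitude/BridgeMaster | Web/Member/views.py | cardstring
-- ===== SOURCE A (Python) =====
-- def cardstring(card):
-- 	Card = card.split('.')
-- 	S = ""
-- 	H = ""
-- 	D = ""
-- 	C = ""
-- 	for c in Card:
-- 		if c[0] == 'S':
-- 			S += c[1]
-- 		elif c[0] == 'H':
-- 			H += c[1]
-- 		elif c[0] == 'D':
-- 			D += c[1]
-- 		elif c[0] == 'C':
-- 			C += c[1]
-- 	Card = S + '.' + H + '.' + D + '.' + C
-- 	return Card
-- ===== SOURCE B (Python) =====
-- def cardstring(card):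
-- 	return '.'.join(''.join(c[1] for c in card.split('.') if c[0] == s) for s in 'SHDC')
-- ===== Notes on version B (the rewrite author's own statement) =====
-- stated objective: idiomatic
-- what changed: Replaces the single loop that distributes each token into four mutable suit accumulators with four independent filtered passes (one per suit letter of 'SHDC') expressed as nested join/comprehension one-liners.
import Mathlib
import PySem

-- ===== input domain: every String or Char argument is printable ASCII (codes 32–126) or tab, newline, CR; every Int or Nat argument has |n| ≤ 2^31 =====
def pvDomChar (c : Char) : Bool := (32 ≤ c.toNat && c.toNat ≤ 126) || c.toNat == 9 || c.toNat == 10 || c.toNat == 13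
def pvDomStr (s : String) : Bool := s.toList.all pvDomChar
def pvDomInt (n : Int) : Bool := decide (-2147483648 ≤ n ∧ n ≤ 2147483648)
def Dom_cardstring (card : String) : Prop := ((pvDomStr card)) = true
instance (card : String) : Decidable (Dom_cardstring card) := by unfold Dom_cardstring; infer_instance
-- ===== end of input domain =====

-- B is the idiomatic one-liner: four filtered passes (one per suit) instead of one loop
-- distributing into four accumulators; same cost, return values proved equal on Pre_.

-- shared indexing helper: c[i], exact wherever Python does not raise (Pre_ excludes IndexError inputs)
def pvCh (c : List Char) (i : Int) : Char := (PySem.List.pyGet? c i).getD ' '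

-- ===== PORT A =====
-- the for-loop over the tokens, threading the four suit accumulators S H D C
def cardstringLoop : List (List Char) → List Char × List Char × List Char × List Char →
    List Char × List Char × List Char × List Char
  | [], acc => acc
  | c :: rest, (S, H, D, C) =>
    if pvCh c 0 = 'S' then cardstringLoop rest (S ++ [pvCh c 1], H, D, C)
    else if pvCh c 0 = 'H' then cardstringLoop rest (S, H ++ [pvCh c 1], D, C)
    else if pvCh c 0 = 'D' then cardstringLoop rest (S, H, D ++ [pvCh c 1], C)
    else if pvCh c 0 = 'C' then cardstringLoop rest (S, H, D, C ++ [pvCh c 1])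
    else cardstringLoop rest (S, H, D, C)

def cardstring (card : String) : String :=
  let Card := PySem.Chars.splitOn card.toList ['.']
  let (S, H, D, C) := cardstringLoop Card ([], [], [], [])
  String.mk (S ++ '.' :: (H ++ '.' :: (D ++ '.' :: C)))

-- ===== PORT B =====
-- ''.join(c[1] for c in toks if c[0] == s): filter, then the singleton strings, then join ''
def suitStrings (toks : List (List Char)) (s : Char) : List (List Char) :=
  (toks.filter (fun c => pvCh c 0 == s)).map (fun c => [pvCh c 1])

def cardstring_alt (card : String) : String :=
  String.mk (PySem.Chars.join ['.']
    (['S', 'H', 'D', 'C'].map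
      (fun s => PySem.Chars.join [] (suitStrings (PySem.Chars.splitOn card.toList ['.']) s))))

-- ===== PRECONDITION & SPEC =====
-- Pre_ excludes exactly the inputs where Python A raises IndexError: an empty token (c[0]) or a
-- one-char token starting with a suit letter (c[1]).  Both Pythons raise on exactly these inputs.
def Pre_cardstring (card : String) : Prop :=
  ∀ t ∈ PySem.Chars.splitOn card.toList ['.'],
    t ≠ [] ∧ (t.length = 1 → t.headD ' ' ∉ (['S', 'H', 'D', 'C'] : List Char))
instance (card : String) : Decidable (Pre_cardstring card) := by unfold Pre_cardstring; infer_instance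
def pvWitness_cardstring : String := "S2.H3.DK.CA.x9"

def Spec_cardstring (card : String) (out : String) : Prop := out = cardstring_alt card
instance (card : String) (out : String) : Decidable (Spec_cardstring card out) := by unfold Spec_cardstring; infer_instance

-- ===== CLAIM (what is proved, stated in full; the proofs are below) =====
def Claim_equal_cardstring : Prop := ∀ (card : String), Dom_cardstring card → Pre_cardstring card → Spec_cardstring card (cardstring card)

-- ===== LEMMAS AND PROOFS =====
def pvCollect (toks : List (List Char)) (s : Char) : List Char :=
  (toks.filter (fun c => pvCh c 0 == s)).map (fun c => pvCh c 1)

theorem cardstringLoop_eq (toks : List (List Char)) (S H D C : List Char) :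
    cardstringLoop toks (S, H, D, C) =
      (S ++ pvCollect toks 'S', H ++ pvCollect toks 'H',
       D ++ pvCollect toks 'D', C ++ pvCollect toks 'C') := by
  induction toks generalizing S H D C with
  | nil => simp [cardstringLoop, pvCollect]
  | cons c rest ih =>
    by_cases h1 : pvCh c 0 = 'S'
    · simp [cardstringLoop, pvCollect, h1, ih]
    · by_cases h2 : pvCh c 0 = 'H'
      · simp [cardstringLoop, pvCollect, h1, h2, ih]
      · by_cases h3 : pvCh c 0 = 'D'
        · simp [cardstringLoop, pvCollect, h1, h2, h3, ih]
        · by_cases h4 : pvCh c 0 = 'C'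
          · simp [cardstringLoop, pvCollect, h1, h2, h3, h4, ih]
          · simp [cardstringLoop, pvCollect, h1, h2, h3, h4, ih]

theorem join_singletons (toks : List (List Char)) (s : Char) :
    PySem.Chars.join [] (suitStrings toks s) = pvCollect toks s := by
  have := PySem.Chars.join_nil_singletons (pvCollect toks s)
  simpa [suitStrings, pvCollect, List.map_map, Function.comp] using this

-- ===== VERDICT (by name: the statement is the Claim_ definition above) =====
theorem cardstring_spec : Claim_equal_cardstring := by
  intro card _ _
  unfold Spec_cardstring cardstring cardstring_alt
  simp only [cardstringLoop_eq, join_singletons, List.map_cons, List.map_nil, List.nil_append]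
  simp [PySem.Chars.join, List.intercalate, List.intersperse]
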